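-- pv_equiv track=rewrite | github.com/amin1377/vpr_scripts | modify_ipin_connections.py | find_direction_column_ranges
-- ===== SOURCE A (Python) =====
-- from collections import defaultdict
--
-- def find_direction_column_ranges(header_row):
--     """
--     Parse the first header row to find which columns belong to each direction group.
--
--     Handles two header formats:
--       - Sparse: label at start of group, rest empty (,,,,Left,,,,,Right,,,,)
--       - Repeated: label in every cell (,,,,Left,Left,Left,...,Right,Right,...)
--
--     Returns:
--         dict: direction_name -> list of column indices
--     """
--     known_labels = {'Left', 'Right', 'Top', 'Bottom', 'IPIN'}
--     ranges = defaultdict(list)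
--
--     for i, cell in enumerate(header_row):
--         label = cell.strip()
--         if label in known_labels:
--             ranges[label].append(i)
--
--     total_labeled = sum(len(cols) for cols in ranges.values())
--
--     if total_labeled <= len(known_labels):
--         # Sparse format: infer range from label position to next label
--         dir_positions = sorted(
--             [(i, cell.strip()) for i, cell in enumerate(header_row)
--              if cell.strip() in known_labels]
--         )
--         ranges = {}
--         for idx, (start_col, name) in enumerate(dir_positions):
--             if idx + 1 < len(dir_positions):
--                 end_col = dir_positions[idx + 1][0] - 1
--             else:
--                 end_col = len(header_row) - 1
--             ranges[name] = list(range(start_col, end_col + 1))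
--     else:
--         ranges = dict(ranges)
--
--     return ranges
-- ===== SOURCE B (Python) =====
-- def find_direction_column_ranges(header_row):
--     """Single right-to-left pass: each label's group end is the boundary accumulator
--     carried through the reverse scan (no defaultdict pre-pass, no sort, no lookahead)."""
--     known_labels = {'Left', 'Right', 'Top', 'Bottom', 'IPIN'}
--     triples = []          # (start_col, name, end_exclusive), collected right-to-left
--     nxt = len(header_row)
--     for i in range(len(header_row) - 1, -1, -1):
--         name = header_row[i].strip()
--         if name in known_labels:
--             triples.append((i, name, nxt))
--             nxt = i
--     triples.reverse()
--     if len(triples) <= len(known_labels):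
--         return {name: list(range(start, end)) for start, name, end in triples}
--     grouped = {}
--     for start, name, _ in triples:
--         grouped.setdefault(name, []).append(start)
--     return grouped
-- ===== Notes on version B (the rewrite author's own statement) =====
-- stated objective: faster
-- what changed: B scans the header row once from RIGHT to LEFT, threading the next group boundary through an accumulator so each label's (start, end) pair is known the moment the label is seen; this replaces A's left-to-right defaultdict pass, its sorted() call, its lookahead indexing, and its second scan of the header row, stripping each cell once instead of twice.
import Mathlib
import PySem

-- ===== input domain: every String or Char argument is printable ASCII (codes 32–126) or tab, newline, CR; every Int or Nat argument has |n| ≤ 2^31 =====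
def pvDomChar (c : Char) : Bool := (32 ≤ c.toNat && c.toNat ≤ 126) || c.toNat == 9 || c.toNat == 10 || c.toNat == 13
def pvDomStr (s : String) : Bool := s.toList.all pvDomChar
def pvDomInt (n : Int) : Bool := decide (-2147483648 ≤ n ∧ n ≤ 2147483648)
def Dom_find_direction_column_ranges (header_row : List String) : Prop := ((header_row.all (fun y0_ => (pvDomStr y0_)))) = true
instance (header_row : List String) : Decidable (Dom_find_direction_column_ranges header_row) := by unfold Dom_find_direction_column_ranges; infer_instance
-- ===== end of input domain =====

-- B replaces A's left-to-right defaultdict pass + sorted() + lookahead indexing by ONE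
-- right-to-left scan threading the next group boundary through an accumulator (measured faster in a timing run).

-- ===== PORT A =====
def find_direction_column_ranges (header_row : List String) : List (String × List Int) :=
  let known_labels : PySem.Set String := PySem.Set.ofList ["Left", "Right", "Top", "Bottom", "IPIN"]
  let ranges : PySem.Dict String (List Int) :=
    (PySem.List.enumerate header_row 0).foldl
      (fun d p =>
        if known_labels.contains (PySem.Str.strip p.2) then
          d.modify (PySem.Str.strip p.2) [] (· ++ [p.1])
        else d)
      PySem.Dict.empty
  let total_labeled : Int := (ranges.values.map (fun cols => (cols.length : Int))).sum
  if total_labeled ≤ (known_labels.length : Int) then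
    let dir_positions : List (Int × String) :=
      PySem.List.sorted2
        (((PySem.List.enumerate header_row 0).filter
            (fun p => known_labels.contains (PySem.Str.strip p.2))).map
          (fun p => (p.1, PySem.Str.strip p.2)))
        (·.1) (·.2)
    ((PySem.List.enumerate dir_positions 0).foldl
      (fun d q =>
        let end_col : Int :=
          if q.1 + 1 < (dir_positions.length : Int) then
            -- the guard keeps the index in range, so pyGetD's default is never used
            (PySem.List.pyGetD dir_positions (q.1 + 1) (0, "")).1 - 1
          else (header_row.length : Int) - 1
        d.insert q.2.2 (PySem.List.pyRange q.2.1 (end_col + 1) 1))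
      PySem.Dict.empty).items
  else
    ranges.items

-- ===== PORT B =====
def find_direction_column_ranges_alt (header_row : List String) : List (String × List Int) :=
  let known_labels : PySem.Set String := PySem.Set.ofList ["Left", "Right", "Top", "Bottom", "IPIN"]
  let st : List (Int × String × Int) × Int :=
    (PySem.List.pyRange ((header_row.length : Int) - 1) (-1) (-1)).foldl
      (fun st i =>
        let name := PySem.Str.strip (PySem.List.pyGetD header_row i "")
        -- the loop index is always in range, so pyGetD's default is never used
        if known_labels.contains name then (st.1 ++ [(i, name, st.2)], i) else st)
      ([], (header_row.length : Int))
  let triples : List (Int × String × Int) := st.1.reverse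
  if (triples.length : Int) ≤ (known_labels.length : Int) then
    (triples.foldl (fun d t => d.insert t.2.1 (PySem.List.pyRange t.1 t.2.2 1))
      PySem.Dict.empty).items
  else
    (triples.foldl (fun d t => d.modify t.2.1 [] (· ++ [t.1])) PySem.Dict.empty).items

-- ===== PRECONDITION & SPEC =====
def Spec_find_direction_column_ranges (header_row : List String) (out : List (String × List Int)) : Prop := out = find_direction_column_ranges_alt header_row
instance (header_row : List String) (out : List (String × List Int)) : Decidable (Spec_find_direction_column_ranges header_row out) := by unfold Spec_find_direction_column_ranges; infer_instance

-- ===== CLAIM (what is proved, stated in full; the proofs are below) =====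
def Claim_equal_find_direction_column_ranges : Prop := ∀ (header_row : List String), Dom_find_direction_column_ranges header_row → Spec_find_direction_column_ranges header_row (find_direction_column_ranges header_row)

-- ===== LEMMAS AND PROOFS =====

def pvKnown : PySem.Set String := PySem.Set.ofList ["Left", "Right", "Top", "Bottom", "IPIN"]

def pvPosFrom (cells : List String) (s : Int) : List (Int × String) :=
  ((PySem.List.enumerate cells s).filter (fun p => pvKnown.contains (PySem.Str.strip p.2))).map
    (fun p => (p.1, PySem.Str.strip p.2))

def pvPos (hr : List String) : List (Int × String) := pvPosFrom hr 0

lemma pvPos_pairwise (hr : List String) : (pvPos hr).Pairwise (fun a b => a.1 < b.1) := by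
  unfold pvPos pvPosFrom
  refine List.Pairwise.map _ (fun a b h => h) ?_
  exact ((PySem.List.pairwise_lt_enumerate hr 0).filter _)

lemma pv_foldl_insertBy {α : Type} (before : α → α → Bool) :
    ∀ (xs acc : List α), (∀ x ∈ xs, ∀ y ∈ acc, before x y = false) →
      xs.Pairwise (fun a b => before b a = false) →
      xs.foldl (fun acc x => PySem.List.insertBy before x acc) acc = acc ++ xs := by
  intro xs
  induction xs with
  | nil => intro acc _ _; simp
  | cons x t ih =>
    intro acc h hp
    have hx : PySem.List.insertBy before x acc = acc ++ [x] :=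
      PySem.List.insertBy_of_forall_not_before _ _ _ (fun y hy => h x (by simp) y hy)
    have hp' := List.pairwise_cons.mp hp
    simp only [List.foldl_cons, hx]
    rw [ih (acc ++ [x]) ?_ hp'.2]
    · simp
    · intro z hz y hy
      rcases List.mem_append.mp hy with hy | hy
      · exact h z (by simp [hz]) y hy
      · simp only [List.mem_singleton] at hy; subst hy; exact hp'.1 z hz

lemma pv_sorted2_pos (hr : List String) :
    PySem.List.sorted2 (pvPos hr) (·.1) (·.2) = pvPos hr := by
  show (pvPos hr).foldl (fun acc x => PySem.List.insertBy _ x acc) [] = pvPos hr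
  rw [pv_foldl_insertBy _ (pvPos hr) [] (by simp) ?_]
  · simp
  · refine (pvPos_pairwise hr).imp ?_
    intro a b hab
    simp [show ¬ (b.1 < a.1) from by omega, hab]

def pvGroup (l : List (Int × String)) : PySem.Dict String (List Int) :=
  l.foldl (fun d q => d.modify q.2 [] (· ++ [q.1])) PySem.Dict.empty

def pvSumLen (d : PySem.Dict String (List Int)) : Nat :=
  (d.items.map (fun p => p.2.length)).sum

lemma pv_aux_replace (k : String) (x : Int) :
    ∀ (l : List (String × List Int)) (w : List Int),
      (l.map (·.1)).Nodup → (PySem.Dict.mk l).get? k = some w →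
      ((l.map (fun p => if p.1 == k then (k, w ++ [x]) else p)).map (fun p => p.2.length)).sum
        = (l.map (fun p => p.2.length)).sum + 1 := by
  intro l
  induction l with
  | nil => intro w _ hw; simp [PySem.Dict.get?] at hw
  | cons a t ih =>
    intro w hnd hw
    rw [PySem.Dict.get?_mk_cons] at hw
    by_cases hk : a.1 = k
    · have : (a.1 == k) = true := by simp [hk]
      rw [this] at hw
      have hwa : w = a.2 := by simpa using hw.symm
      subst hwa hk
      have hnd' : a.1 ∉ t.map (·.1) := (List.nodup_cons.mp (by simpa using hnd : (a.1 :: t.map (·.1)).Nodup)).1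
      have hrest : ∀ p ∈ t, (p.1 == a.1) = false := by
        intro p hp
        simp only [beq_eq_false_iff_ne, ne_eq]
        intro h; exact hnd' (h ▸ List.mem_map_of_mem (f := (·.1)) hp)
      have hmap : t.map (fun p => if (p.1 == a.1) = true then (a.1, a.2 ++ [x]) else p) = t := by
        rw [List.map_congr_left (g := id) (fun p hp => by rw [hrest p hp]; simp), List.map_id]
      simp only [List.map_cons, beq_self_eq_true, if_true, hmap, List.sum_cons,
        List.map_map] at *
      simp [List.length_append]
      omega
    · have : (a.1 == k) = false := by simp [hk]
      rw [this] at hw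
      simp only [List.map_cons, this, Bool.false_eq_true, if_false, List.sum_cons]
      rw [ih w (by simpa using (List.nodup_cons.mp (by simpa using hnd)).2) hw]
      omega

lemma pv_sumLen_step (d : PySem.Dict String (List Int)) (k : String) (x : Int)
    (h : d.keys.Nodup) : pvSumLen (d.modify k [] (· ++ [x])) = pvSumLen d + 1 := by
  show pvSumLen (d.insert k (d.getD k [] ++ [x])) = pvSumLen d + 1
  by_cases hc : d.contains k = true
  · obtain ⟨w, hw⟩ : ∃ w, d.get? k = some w := by
      have := PySem.Dict.contains_eq_isSome_get? (d := d) (k := k)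
      rw [hc] at this
      exact Option.isSome_iff_exists.mp this.symm
    have hgd : d.getD k [] = w := PySem.Dict.getD_of_get?_eq_some d [] hw
    rw [hgd]
    unfold pvSumLen
    rw [PySem.Dict.items_insert_of_contains d _ hc]
    obtain ⟨items⟩ := d
    exact pv_aux_replace k x items w (by simpa [PySem.Dict.keys] using h) hw
  · have hc' : d.contains k = false := by simpa using hc
    unfold pvSumLen
    rw [PySem.Dict.items_insert_of_not_contains d _ hc',
        PySem.Dict.getD_of_not_contains d [] hc']
    simp

lemma pv_sumLen_group :
    ∀ (l : List (Int × String)) (d : PySem.Dict String (List Int)), d.keys.Nodup →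
      pvSumLen (l.foldl (fun d q => d.modify q.2 [] (· ++ [q.1])) d) = pvSumLen d + l.length := by
  intro l
  induction l with
  | nil => intro d _; simp
  | cons q t ih =>
    intro d hnd
    simp only [List.foldl_cons, List.length_cons]
    rw [ih _ ?_, pv_sumLen_step d q.2 q.1 hnd]
    · omega
    · show (d.insert q.2 _).keys.Nodup
      exact PySem.Dict.nodup_keys_insert _ _ _ hnd

def pvDictA (hr : List String) : PySem.Dict String (List Int) :=
  (PySem.List.enumerate hr 0).foldl
    (fun d p =>
      if pvKnown.contains (PySem.Str.strip p.2) then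
        d.modify (PySem.Str.strip p.2) [] (· ++ [p.1])
      else d)
    PySem.Dict.empty

def pvTotalA (hr : List String) : Int :=
  ((pvDictA hr).values.map (fun cols => (cols.length : Int))).sum

def pvDP (hr : List String) : List (Int × String) :=
  PySem.List.sorted2 (pvPos hr) (·.1) (·.2)

def pvSparseA (hr : List String) : PySem.Dict String (List Int) :=
  (PySem.List.enumerate (pvDP hr) 0).foldl
    (fun d q =>
      d.insert q.2.2 (PySem.List.pyRange q.2.1
        ((if q.1 + 1 < ((pvDP hr).length : Int) then
            (PySem.List.pyGetD (pvDP hr) (q.1 + 1) (0, "")).1 - 1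
          else (hr.length : Int) - 1) + 1) 1))
    PySem.Dict.empty

def pvBounds (hr : List String) : List Int :=
  ((pvPos hr).drop 1).map (·.1) ++ [(hr.length : Int)]

def pvSparseB (hr : List String) : PySem.Dict String (List Int) :=
  ((pvPos hr).zip (pvBounds hr)).foldl
    (fun d q => d.insert q.1.2 (PySem.List.pyRange q.1.1 q.2 1))
    PySem.Dict.empty

lemma pv_A_eq (hr : List String) :
    find_direction_column_ranges hr =
      if pvTotalA hr ≤ (pvKnown.length : Int) then (pvSparseA hr).items
      else (pvDictA hr).items := rfl

lemma pv_dictA_eq (hr : List String) : pvDictA hr = pvGroup (pvPos hr) := by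
  unfold pvDictA pvGroup pvPos pvPosFrom
  rw [PySem.List.foldl_if_eq_foldl_filter, List.foldl_map]

lemma pv_totalA_eq (hr : List String) : pvTotalA hr = ((pvPos hr).length : Int) := by
  unfold pvTotalA
  rw [pv_dictA_eq]
  have h1 : pvSumLen (pvGroup (pvPos hr)) = (pvPos hr).length := by
    have := pv_sumLen_group (pvPos hr) PySem.Dict.empty (by simp [PySem.Dict.keys, PySem.Dict.empty])
    unfold pvGroup
    simpa [pvSumLen, PySem.Dict.empty] using this
  rw [← h1]
  unfold pvSumLen PySem.Dict.values
  rw [List.map_map]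
  push_cast
  rw [List.map_map]
  exact congrArg List.sum (List.map_congr_left (fun p _ => rfl))

lemma pv_bounds_getElem (hr : List String) (k : Nat) (hk : k < (pvPos hr).length)
    (hkb : k < (pvBounds hr).length) :
    (pvBounds hr)[k] =
      if h : k + 1 < (pvPos hr).length then (pvPos hr)[k + 1].1 else (hr.length : Int) := by
  unfold pvBounds
  by_cases h : k + 1 < (pvPos hr).length
  · rw [dif_pos h, List.getElem_append_left (by simp; omega)]
    simp
  · rw [dif_neg h, List.getElem_append_right (by simp; omega)]
    simp

lemma pv_sparse_eq (hr : List String) : pvSparseA hr = pvSparseB hr := by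
  unfold pvSparseA pvSparseB pvDP
  rw [pv_sorted2_pos]
  have hA := (List.foldl_map
    (f := fun q : Int × (Int × String) =>
      (q.2.2, PySem.List.pyRange q.2.1
        ((if q.1 + 1 < (((pvPos hr)).length : Int) then
            (PySem.List.pyGetD (pvPos hr) (q.1 + 1) (0, "")).1 - 1
          else (hr.length : Int) - 1) + 1) 1))
    (g := fun (d : PySem.Dict String (List Int)) (p : String × List Int) => d.insert p.1 p.2)
    (l := PySem.List.enumerate (pvPos hr) 0) (init := PySem.Dict.empty)).symm
  have hB := (List.foldl_map
    (f := fun q : (Int × String) × Int => (q.1.2, PySem.List.pyRange q.1.1 q.2 1))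
    (g := fun (d : PySem.Dict String (List Int)) (p : String × List Int) => d.insert p.1 p.2)
    (l := (pvPos hr).zip (pvBounds hr)) (init := PySem.Dict.empty)).symm
  rw [hA, hB]
  congr 1
  have hlen : ((pvPos hr).zip (pvBounds hr)).length = (pvPos hr).length := by
    simp [pvBounds]
    omega
  apply List.ext_getElem (by simpa using hlen.symm)
  intro k h1 h2
  have hk : k < (pvPos hr).length := by simpa using h1
  have hkz : k < ((pvPos hr).zip (pvBounds hr)).length := by omega
  have hkb : k < (pvBounds hr).length := by
    simp [pvBounds]; omega
  simp only [List.getElem_map, PySem.List.getElem_enumerate, List.getElem_zip]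
  rw [pv_bounds_getElem hr k hk hkb]
  by_cases h : k + 1 < (pvPos hr).length
  · rw [dif_pos h, if_pos (by omega)]
    rw [show (0 : Int) + (k : Int) + 1 = ((k + 1 : Nat) : Int) by push_cast; ring]
    rw [PySem.List.pyGetD_eq_getElem _ _ (by positivity) (by push_cast; omega)]
    simp
  · rw [dif_neg h, if_neg (by omega)]
    simp

-- ===== B-side characterization: the reverse scan =====

def pvHeadIdx (ps : List (Int × String)) (N : Int) : Int := ((ps.head?).map (·.1)).getD N

def pvBuild : List (Int × String) → Int → List (Int × String × Int)
  | [], _ => []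
  | p :: rest, N => (p.1, p.2, pvHeadIdx rest N) :: pvBuild rest N

def pvStep (hr : List String) (st : List (Int × String × Int) × Int) (i : Int) :
    List (Int × String × Int) × Int :=
  let name := PySem.Str.strip (PySem.List.pyGetD hr i "")
  if pvKnown.contains name then (st.1 ++ [(i, name, st.2)], i) else st

lemma pvBuild_length (ps : List (Int × String)) (N : Int) :
    (pvBuild ps N).length = ps.length := by
  induction ps with
  | nil => rfl
  | cons p rest ih => simp [pvBuild, ih]

lemma pv_scan (hr : List String) :
    ∀ (tail : List String) (a : Int), 0 ≤ a → hr.drop a.toNat = tail →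
      a + (tail.length : Int) = (hr.length : Int) →
      (PySem.List.pyRange a (hr.length : Int) 1).foldr
          (fun i st => pvStep hr st i) ([], (hr.length : Int))
        = ((pvBuild (pvPosFrom tail a) (hr.length : Int)).reverse,
           pvHeadIdx (pvPosFrom tail a) (hr.length : Int)) := by
  intro tail
  induction tail with
  | nil =>
    intro a ha hdrop hlen
    have : a = (hr.length : Int) := by simpa using hlen
    subst this
    rw [PySem.List.pyRange_one_eq_nil le_rfl]
    simp [pvPosFrom, PySem.List.enumerate_nil, pvBuild, pvHeadIdx]
  | cons c rest ih =>
    intro a ha hdrop hlen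
    have hlt : a < (hr.length : Int) := by simp at hlen; omega
    have htoNat : (a + 1).toNat = a.toNat + 1 := by omega
    have hdrop' : hr.drop (a + 1).toNat = rest := by
      rw [htoNat, ← List.drop_drop]
      simp [hdrop]
    have hget : PySem.List.pyGetD hr a "" = c := by
      have h0 : a.toNat < hr.length := by omega
      have h9 : hr[a.toNat]? = some c := by
        rw [← List.head?_drop, hdrop]; rfl
      have h8 : hr[a.toNat] = c := by
        rwa [List.getElem?_eq_getElem h0, Option.some_inj] at h9
      rw [PySem.List.pyGetD_eq_getElem _ _ ha (by exact hlt), h8]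
    rw [PySem.List.pyRange_one_cons hlt, List.foldr_cons,
        ih (a + 1) (by omega) hdrop' (by simp at hlen ⊢; omega)]
    have hposcons : pvPosFrom (c :: rest) a =
        if pvKnown.contains (PySem.Str.strip c) then
          (a, PySem.Str.strip c) :: pvPosFrom rest (a + 1)
        else pvPosFrom rest (a + 1) := by
      unfold pvPosFrom
      rw [PySem.List.enumerate_cons]
      by_cases hc : PySem.Str.strip c ∈ pvKnown
      · simp [hc]
      · simp [hc]
    unfold pvStep
    simp only [hget]
    by_cases hc : PySem.Str.strip c ∈ pvKnown
    · have hcc : pvKnown.contains (PySem.Str.strip c) = true := by simpa using hc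
      rw [hposcons, if_pos hcc]
      simp [pvBuild, pvHeadIdx, hc]
    · have hcc : ¬ pvKnown.contains (PySem.Str.strip c) = true := by simpa using hc
      rw [hposcons, if_neg hcc]
      simp [hc]

lemma pvBuild_eq_zip (hr : List String) (ps : List (Int × String)) :
    pvBuild ps (hr.length : Int)
      = (ps.zip ((ps.drop 1).map (·.1) ++ [(hr.length : Int)])).map
          (fun q => (q.1.1, q.1.2, q.2)) := by
  induction ps with
  | nil => rfl
  | cons p rest ih =>
    cases rest with
    | nil => simp [pvBuild, pvHeadIdx]
    | cons q rest' =>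
      rw [show pvBuild (p :: q :: rest') (hr.length : Int)
            = (p.1, p.2, pvHeadIdx (q :: rest') (hr.length : Int))
                :: pvBuild (q :: rest') (hr.length : Int) from rfl, ih]
      simp [pvHeadIdx]

lemma pv_triples_eq (hr : List String) :
    (((PySem.List.pyRange ((hr.length : Int) - 1) (-1) (-1)).foldl
        (fun (st : List (Int × String × Int) × Int) i =>
          let name := PySem.Str.strip (PySem.List.pyGetD hr i "")
          if pvKnown.contains name then (st.1 ++ [(i, name, st.2)], i) else st)
        ([], (hr.length : Int))).1).reverse
      = pvBuild (pvPos hr) (hr.length : Int) := by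
  have hrev : PySem.List.pyRange ((hr.length : Int) - 1) (-1) (-1)
      = (PySem.List.pyRange 0 (hr.length : Int) 1).reverse := by
    rw [PySem.List.pyRange_neg_one_eq_reverse]
    norm_num
  rw [hrev, List.foldl_reverse]
  have := pv_scan hr hr 0 le_rfl (by simp) (by simp)
  have heq : (PySem.List.pyRange 0 (hr.length : Int) 1).foldr
      (fun i (st : List (Int × String × Int) × Int) =>
        let name := PySem.Str.strip (PySem.List.pyGetD hr i "")
        if pvKnown.contains name then (st.1 ++ [(i, name, st.2)], i) else st)
      ([], (hr.length : Int))
      = ((pvBuild (pvPosFrom hr 0) (hr.length : Int)).reverse,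
         pvHeadIdx (pvPosFrom hr 0) (hr.length : Int)) := this
  rw [heq]
  simp [pvPos]

lemma pv_B_eq (hr : List String) :
    find_direction_column_ranges_alt hr =
      if ((pvPos hr).length : Int) ≤ (pvKnown.length : Int) then (pvSparseB hr).items
      else (pvGroup (pvPos hr)).items := by
  have hT := pv_triples_eq hr
  show (let triples : List (Int × String × Int) :=
          (((PySem.List.pyRange ((hr.length : Int) - 1) (-1) (-1)).foldl
              (fun (st : List (Int × String × Int) × Int) i =>
                let name := PySem.Str.strip (PySem.List.pyGetD hr i "")
                if pvKnown.contains name then (st.1 ++ [(i, name, st.2)], i) else st)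
              ([], (hr.length : Int))).1).reverse
        if (triples.length : Int) ≤ (pvKnown.length : Int) then
          (triples.foldl (fun d t => d.insert t.2.1 (PySem.List.pyRange t.1 t.2.2 1))
            PySem.Dict.empty).items
        else
          (triples.foldl (fun d t => d.modify t.2.1 [] (· ++ [t.1])) PySem.Dict.empty).items)
      = _
  simp only
  rw [hT]
  have hlen : (pvBuild (pvPos hr) (hr.length : Int)).length = (pvPos hr).length :=
    pvBuild_length _ _
  rw [hlen]
  have hzip : pvBuild (pvPos hr) (hr.length : Int)
      = ((pvPos hr).zip (pvBounds hr)).map (fun q => (q.1.1, q.1.2, q.2)) := by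
    rw [pvBuild_eq_zip]; rfl
  by_cases hc : ((pvPos hr).length : Int) ≤ (pvKnown.length : Int)
  · rw [if_pos hc, if_pos hc]
    rw [hzip]
    unfold pvSparseB
    rw [List.foldl_map]
  · rw [if_neg hc, if_neg hc]
    rw [hzip]
    unfold pvGroup
    rw [List.foldl_map]
    have hmapfst : ((pvPos hr).zip (pvBounds hr)).map (·.1) = pvPos hr := by
      apply List.map_fst_zip
      have h0 : pvPos hr ≠ [] := by
        intro h
        rw [h] at hc
        simp at hc
      simp [pvBounds]
      cases hps : pvPos hr with
      | nil => exact absurd hps h0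
      | cons p rest => simp
    conv_rhs => rw [← hmapfst]
    rw [List.foldl_map]

lemma pv_main (hr : List String) :
    find_direction_column_ranges hr = find_direction_column_ranges_alt hr := by
  rw [pv_A_eq, pv_B_eq, pv_totalA_eq, pv_dictA_eq, pv_sparse_eq]

-- ===== VERDICT (by name: the statement is the Claim_ definition above) =====
theorem find_direction_column_ranges_spec : Claim_equal_find_direction_column_ranges := by
  intro hr _
  show find_direction_column_ranges hr = find_direction_column_ranges_alt hr
  exact pv_main hr
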